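-- pv_equiv track=rewrite | github.com/hanchangzi/test | eval.py | getucom
-- ===== SOURCE A (Python) =====
-- def getucom(um,umwe):
--     df = {}
--     for i in range(len(um)):
--             if  um[i] not in df:
--                 df[um[i]] = 0
--             df[um[i]] += umwe[i]
--     result = sorted(df.items(), key=lambda item:item[1], reverse=True)
--     return [m[0] for m in result][:2]
-- ===== SOURCE B (Python) =====
-- def getucom(um, umwe):
--     df = {}
--     for k, w in zip(um, umwe):
--         df[k] = df.get(k, 0) + w
--     first = second = None
--     for k, w in df.items():
--         if first is None or w > first[1]:
--             first, second = (k, w), first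
--         elif second is None or w > second[1]:
--             second = (k, w)
--     out = []
--     if first is not None:
--         out.append(first[0])
--     if second is not None:
--         out.append(second[0])
--     return out
-- ===== Notes on version B (the rewrite author's own statement) =====
-- stated objective: faster
-- what changed: Replaces the full stable reverse-sort of the aggregated dict items by a single linear scan that maintains the top-two (key, weight) slots with strict > updates (preserving insertion-order tie-breaking), and aggregates via zip instead of index arithmetic.
import Mathlib
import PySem

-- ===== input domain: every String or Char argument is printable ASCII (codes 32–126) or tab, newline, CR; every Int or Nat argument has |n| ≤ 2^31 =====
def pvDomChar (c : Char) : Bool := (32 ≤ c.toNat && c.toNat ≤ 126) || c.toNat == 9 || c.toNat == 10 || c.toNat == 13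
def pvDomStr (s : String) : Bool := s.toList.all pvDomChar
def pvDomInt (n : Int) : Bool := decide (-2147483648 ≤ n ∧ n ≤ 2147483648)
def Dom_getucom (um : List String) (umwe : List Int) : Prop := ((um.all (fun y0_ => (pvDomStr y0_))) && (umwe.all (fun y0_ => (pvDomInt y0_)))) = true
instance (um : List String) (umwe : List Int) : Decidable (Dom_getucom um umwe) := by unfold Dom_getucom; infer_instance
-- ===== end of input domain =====

-- B replaces A's stable reverse-sort of the aggregated items by one linear scan keeping the top-two slots (faster).

-- ===== PORT A =====
def getucom (um : List String) (umwe : List Int) : List String :=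
  let df : PySem.Dict String Int :=
    (PySem.List.pyRange 0 um.length 1).foldl (fun d i =>
      let k := PySem.List.pyGetD um i ""
      let d := if d.contains k then d else d.insert k 0
      d.insert k (d.getD k 0 + PySem.List.pyGetD umwe i 0)) PySem.Dict.empty
  let result := PySem.List.sorted df.items (fun item => item.2) true
  (result.map (fun m => m.1)).take 2

-- ===== PORT B =====
-- one scan step of B's top-two loop: first/second as Options, strict > updates
def pvScanStep (st : Option (String × Int) × Option (String × Int)) (p : String × Int) :
    Option (String × Int) × Option (String × Int) :=
  if (match st.1 with | none => true | some f => decide (p.2 > f.2)) then (some p, st.1)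
  else if (match st.2 with | none => true | some s => decide (p.2 > s.2)) then (st.1, some p)
  else st

def getucom_alt (um : List String) (umwe : List Int) : List String :=
  let df : PySem.Dict String Int :=
    (um.zip umwe).foldl (fun d p => d.insert p.1 (d.getD p.1 0 + p.2)) PySem.Dict.empty
  let st := df.items.foldl pvScanStep (none, none)
  (match st.1 with | some f => [f.1] | none => []) ++
  (match st.2 with | some s => [s.1] | none => [])

-- ===== PRECONDITION & SPEC =====
-- A raises IndexError (umwe[i]) when umwe is shorter than um; excluded.
def Pre_getucom (um : List String) (umwe : List Int) : Prop := um.length ≤ umwe.length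
instance (um : List String) (umwe : List Int) : Decidable (Pre_getucom um umwe) := by unfold Pre_getucom; infer_instance
def pvWitness_getucom : List String × List Int := (["a", "b", "a"], [1, 2, 3])

def Spec_getucom (um : List String) (umwe : List Int) (out : List String) : Prop := out = getucom_alt um umwe
instance (um : List String) (umwe : List Int) (out : List String) : Decidable (Spec_getucom um umwe out) := by unfold Spec_getucom; infer_instance

-- ===== CLAIM (what is proved, stated in full; the proofs are below) =====
def Claim_equal_getucom : Prop := ∀ (um : List String) (umwe : List Int), Dom_getucom um umwe → Pre_getucom um umwe → Spec_getucom um umwe (getucom um umwe)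

-- ===== LEMMAS AND PROOFS =====

-- A's per-element dict update (conditional insert-0, then add) equals B's single insert.
theorem pvStepA_eq_stepB (d : PySem.Dict String Int) (k : String) (w : Int) :
    (let d' := if d.contains k then d else d.insert k 0
     d'.insert k (d'.getD k 0 + w)) = d.insert k (d.getD k 0 + w) := by
  by_cases h : d.contains k = true
  · simp [h]
  · simp [h, PySem.Dict.getD_insert_self, PySem.Dict.insert_insert_self,
      PySem.Dict.getD_of_not_contains]

-- the index list A iterates, paired with its lookups, is exactly zip um umwe
theorem pvPairs_eq_zip (um : List String) (umwe : List Int) (h : um.length ≤ umwe.length) :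
    (PySem.List.pyRange 0 um.length 1).map
      (fun i => (PySem.List.pyGetD um i "", PySem.List.pyGetD umwe i 0)) = um.zip umwe := by
  apply List.ext_getElem
  · simp [PySem.List.length_pyRange_one]; omega
  · intro k h1 h2
    have hk : k < um.length := by
      simpa [PySem.List.length_pyRange_one] using h1
    have hr : (PySem.List.pyRange 0 (um.length) 1)[k]'(by simpa [PySem.List.length_pyRange_one] using h1) = (k : Int) := by
      rw [PySem.List.getElem_pyRange_one]; omega
    simp [hr, PySem.List.pyGetD_natCast, List.getD_eq_getElem?_getD,
      List.getElem?_eq_getElem hk, List.getElem?_eq_getElem (show k < umwe.length by omega)]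

-- B's top-two state of a list (head and second element, as options)
def pvT2 (s : List (String × Int)) : Option (String × Int) × Option (String × Int) :=
  match s with
  | [] => (none, none)
  | [a] => (some a, none)
  | a :: b :: _ => (some a, some b)

-- inserting into a descending-sorted list affects the top two exactly as one scan step
theorem pvT2_insertBy (x : String × Int) (s : List (String × Int)) :
    pvT2 (PySem.List.insertBy (fun a b => decide (b.2 < a.2)) x s) = pvScanStep (pvT2 s) x := by
  match s with
  | [] => simp [PySem.List.insertBy, pvT2, pvScanStep]
  | [a] =>
    by_cases h : a.2 < x.2
    · simp [PySem.List.insertBy, pvT2, pvScanStep, h]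
    · simp [PySem.List.insertBy, pvT2, pvScanStep, h]
  | a :: b :: t =>
    by_cases h1 : a.2 < x.2
    · simp [PySem.List.insertBy, pvT2, pvScanStep, h1]
    · by_cases h2 : b.2 < x.2
      · simp [PySem.List.insertBy, pvT2, pvScanStep, h1, h2]
      · simp only [PySem.List.insertBy, decide_eq_true_eq, if_neg h1, if_neg h2]
        cases hins : PySem.List.insertBy (fun a b => decide (b.2 < a.2)) x t with
        | nil =>
          exact absurd (by simp [hins] : x ∉ PySem.List.insertBy (fun a b => decide (b.2 < a.2)) x t)
            (by simp [PySem.List.mem_insertBy])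
        | cons c t' => simp [pvT2, pvScanStep, h1, h2]

theorem pvT2_foldl (l : List (String × Int)) (s : List (String × Int)) :
    pvT2 (l.foldl (fun acc x => PySem.List.insertBy (fun a b => decide (b.2 < a.2)) x acc) s) =
      l.foldl pvScanStep (pvT2 s) := by
  induction l generalizing s with
  | nil => rfl
  | cons x l ih => simp only [List.foldl_cons, ih, pvT2_insertBy]

-- the first two keys of any list are rendered from its pvT2 state
theorem pvRender (s : List (String × Int)) :
    (s.map (fun m => m.1)).take 2 =
      (match (pvT2 s).1 with | some f => [f.1] | none => []) ++
      (match (pvT2 s).2 with | some q => [q.1] | none => []) := by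
  match s with
  | [] => rfl
  | [a] => rfl
  | a :: b :: t => rfl

-- ===== VERDICT (by name: the statement is the Claim_ definition above) =====
theorem getucom_spec : Claim_equal_getucom := by
  intro um umwe _ hpre
  show getucom um umwe = getucom_alt um umwe
  have hfold :
      (PySem.List.pyRange 0 um.length 1).foldl (fun d i =>
        let k := PySem.List.pyGetD um i ""
        let d := if d.contains k then d else d.insert k 0
        d.insert k (d.getD k 0 + PySem.List.pyGetD umwe i 0)) (PySem.Dict.empty : PySem.Dict String Int) =
      (um.zip umwe).foldl (fun d p => d.insert p.1 (d.getD p.1 0 + p.2)) PySem.Dict.empty := by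
    rw [← pvPairs_eq_zip um umwe hpre, List.foldl_map]
    refine congrArg (fun f => List.foldl f (PySem.Dict.empty : PySem.Dict String Int)
      (PySem.List.pyRange 0 um.length 1)) ?_
    funext d i
    exact pvStepA_eq_stepB d _ _
  simp only [getucom, getucom_alt, hfold, PySem.List.sorted_rev_eq_foldl_insertBy,
    pvRender, pvT2_foldl]
  rfl
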